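-- pv_equiv track=rewrite | github.com/k2datascience/twitter_filter | 5_python_class/tweet.py | filter_brands
-- ===== SOURCE A (Python) =====
-- def filter_brands(text):
--     brands = ["@WarbyParker", "@Bonobos", "@Casper", "@Glossier", "@DollarShaveClub", "@Allbirds"]
--
--     for brand in brands:
--         if (brand in text):
--             text = text.replace(brand, "<mark>{}</mark>".format(brand))
--         else:
--             continue
--
--     return text
-- ===== SOURCE B (Python) =====
-- def filter_brands(text):
--     brands = ["@WarbyParker", "@Bonobos", "@Casper", "@Glossier", "@DollarShaveClub", "@Allbirds"]
--     out = []
--     i = 0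
--     n = len(text)
--     while i < n:
--         for b in brands:
--             if text.startswith(b, i):
--                 out.append("<mark>" + b + "</mark>")
--                 i += len(b)
--                 break
--         else:
--             out.append(text[i])
--             i += 1
--     return "".join(out)
-- ===== Notes on version B (the rewrite author's own statement) =====
-- stated objective: alternative
-- what changed: A makes six sequential passes (one `in` test plus one str.replace per brand); B makes a single left-to-right scan over the text, wrapping the first brand that matches at each position and copying other characters.
import Mathlib
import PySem

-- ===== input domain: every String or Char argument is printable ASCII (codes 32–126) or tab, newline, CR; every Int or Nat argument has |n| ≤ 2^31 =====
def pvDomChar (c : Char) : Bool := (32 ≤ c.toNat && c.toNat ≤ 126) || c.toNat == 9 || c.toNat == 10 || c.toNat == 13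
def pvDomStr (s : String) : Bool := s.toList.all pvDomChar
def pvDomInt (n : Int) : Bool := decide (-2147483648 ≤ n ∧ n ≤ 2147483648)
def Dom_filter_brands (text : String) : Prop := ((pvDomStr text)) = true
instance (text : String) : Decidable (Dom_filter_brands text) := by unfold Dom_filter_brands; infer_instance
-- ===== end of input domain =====

-- B replaces A's six sequential `in`/`replace` passes by one left-to-right scan that wraps the
-- first brand matching at each position (objective: alternative single-pass algorithm, same results).

-- ===== PORT A =====
-- A: for brand in brands: if brand in text: text = text.replace(brand, "<mark>{}</mark>".format(brand))
def pvBrands : List String :=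
  ["@WarbyParker", "@Bonobos", "@Casper", "@Glossier", "@DollarShaveClub", "@Allbirds"]

def filter_brands (text : String) : String :=
  pvBrands.foldl
    (fun t brand =>
      if PySem.Str.isIn brand t then
        PySem.Str.replace t brand ("<mark>" ++ brand ++ "</mark>")
      else t)
    text

-- ===== PORT B =====
-- B: one pass over the characters; at each position try the brands in order with
-- text.startswith(b, i) (here: List.isPrefixOf on the remaining characters); on a match emit
-- "<mark>" + b + "</mark>" and skip len(b) characters, otherwise copy one character.
def pvBrandsL : List (List Char) :=
  ["@WarbyParker".toList, "@Bonobos".toList, "@Casper".toList,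
   "@Glossier".toList, "@DollarShaveClub".toList, "@Allbirds".toList]

def pvWrapL (b : List Char) : List Char := "<mark>".toList ++ b ++ "</mark>".toList

def pvScan (bs : List (List Char)) : List Char → List Char
  | [] => []
  | c :: cs =>
    match bs.find? (fun b => b.isPrefixOf (c :: cs)) with
    | some b => pvWrapL b ++ pvScan bs (cs.drop (b.length - 1))
    | none => c :: pvScan bs cs
termination_by s => s.length
decreasing_by
  · simp only [List.length_drop, List.length_cons]; omega
  · simp only [List.length_cons]; omega

def filter_brands_alt (text : String) : String :=
  String.ofList (pvScan pvBrandsL text.toList)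

-- ===== PRECONDITION & SPEC =====
def Spec_filter_brands (text : String) (out : String) : Prop := out = filter_brands_alt text
instance (text : String) (out : String) : Decidable (Spec_filter_brands text out) := by unfold Spec_filter_brands; infer_instance

-- ===== CLAIM (what is proved, stated in full; the proofs are below) =====
def Claim_equal_filter_brands : Prop := ∀ (text : String), Dom_filter_brands text → Spec_filter_brands text (filter_brands text)

-- ===== LEMMAS AND PROOFS =====

-- Structural (fuel-free) version of Python's str.replace, used only in the proofs.
def pvRepl (p r : List Char) : List Char → List Char
  | [] => []
  | c :: t => if p.isPrefixOf (c :: t) then r ++ pvRepl p r (t.drop (p.length - 1)) else c :: pvRepl p r t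
termination_by s => s.length
decreasing_by
  · simp only [List.length_drop, List.length_cons]; omega
  · simp only [List.length_cons]; omega

-- Unfolding equations for the two well-founded recursions.
lemma pvRepl_nil_eq (p r : List Char) : pvRepl p r [] = [] := by rw [pvRepl]

lemma pvRepl_cons_pos {p : List Char} (r : List Char) {c : Char} {t : List Char}
    (h : p.isPrefixOf (c :: t) = true) :
    pvRepl p r (c :: t) = r ++ pvRepl p r (t.drop (p.length - 1)) := by
  rw [pvRepl, if_pos h]

lemma pvRepl_cons_neg {p : List Char} (r : List Char) {c : Char} {t : List Char}
    (h : ¬ p.isPrefixOf (c :: t) = true) :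
    pvRepl p r (c :: t) = c :: pvRepl p r t := by
  rw [pvRepl, if_neg h]

lemma pvScan_nil_eq (bs : List (List Char)) : pvScan bs [] = [] := by rw [pvScan]

lemma pvScan_cons_some {bs : List (List Char)} {c : Char} {cs : List Char} {b : List Char}
    (hf : bs.find? (fun b => b.isPrefixOf (c :: cs)) = some b) :
    pvScan bs (c :: cs) = pvWrapL b ++ pvScan bs (cs.drop (b.length - 1)) := by
  rw [pvScan, hf]

lemma pvScan_cons_none {bs : List (List Char)} {c : Char} {cs : List Char}
    (hf : bs.find? (fun b => b.isPrefixOf (c :: cs)) = none) :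
    pvScan bs (c :: cs) = c :: pvScan bs cs := by
  rw [pvScan, hf]

lemma pvRepl_go_eq (old new : List Char) (hold : old ≠ []) :
    ∀ fuel l acc, l.length ≤ fuel →
      PySem.Chars.replace.go old new fuel l acc = acc.reverse ++ pvRepl old new l := by
  intro fuel
  induction fuel with
  | zero =>
    intro l acc h
    have : l = [] := List.eq_nil_of_length_eq_zero (Nat.le_zero.mp h)
    subst this
    simp [PySem.Chars.replace.go, pvRepl]
  | succ n ih =>
    intro l acc h
    cases l with
    | nil => simp [PySem.Chars.replace.go, pvRepl]
    | cons c t =>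
      rw [PySem.Chars.replace.go]
      by_cases hp : old.isPrefixOf (c :: t) = true
      · rw [if_pos hp]
        have hlen : old.length ≥ 1 := by
          cases old with | nil => exact absurd rfl hold | cons _ _ => simp
        have hdrop : List.drop old.length (c :: t) = t.drop (old.length - 1) := by
          cases old with
          | nil => exact absurd rfl hold
          | cons o os => simp
        have hle : (List.drop old.length (c :: t)).length ≤ n := by
          simp only [List.length_drop, List.length_cons] at *
          omega
        rw [ih _ _ hle, hdrop]
        rw [pvRepl_cons_pos new hp]
        simp
      · rw [if_neg hp]
        have hle : t.length ≤ n := by simp only [List.length_cons] at h; omega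
        rw [ih _ _ hle]
        rw [pvRepl_cons_neg new hp]
        simp

lemma pvChars_replace_eq (s old new : List Char) (hold : old ≠ []) :
    PySem.Chars.replace s old new = pvRepl old new s := by
  rw [PySem.Chars.replace]
  have : old.isEmpty = false := by cases old with | nil => exact absurd rfl hold | cons _ _ => rfl
  rw [this]
  simpa using pvRepl_go_eq old new hold s.length s [] (le_refl _)

lemma pvRepl_of_not_infix (p r : List Char) (_hp : p ≠ []) :
    ∀ l, ¬ p <:+: l → pvRepl p r l = l := by
  intro l
  induction l with
  | nil => intro _; exact pvRepl_nil_eq p r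
  | cons c t ih =>
    intro h
    have hnp : ¬ p.isPrefixOf (c :: t) = true := by
      intro hpre
      exact h (List.isPrefixOf_iff_prefix.mp hpre).isInfix
    rw [pvRepl_cons_neg r hnp]
    have : ¬ p <:+: t := fun hi => h (hi.trans (List.suffix_cons c t).isInfix)
    rw [ih this]

lemma pvTake_prefix_of_prefix (p u v : List Char) (h : p <+: u ++ v) :
    p.take u.length <+: u := by
  have := h.take u.length
  simpa [List.take_left] using this

lemma pvRepl_skip (p r u v : List Char) (_hp : p ≠ [])
    (h : ∀ j < u.length, ¬ p.take (u.length - j) <+: u.drop j) :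
    pvRepl p r (u ++ v) = u ++ pvRepl p r v := by
  induction u with
  | nil => simp
  | cons c u' ih =>
    have hne : ¬ p.isPrefixOf (c :: (u' ++ v)) = true := by
      intro hpre
      have hpre' : p <+: (c :: u') ++ v := by simpa using List.isPrefixOf_iff_prefix.mp hpre
      exact h 0 (by simp) (by simpa using pvTake_prefix_of_prefix p (c :: u') v hpre')
    rw [List.cons_append, pvRepl_cons_neg r hne]
    rw [ih (fun j hj => by
      have := h (j + 1) (by simpa using Nat.succ_lt_succ hj)
      simpa using this)]
    rfl

lemma pvScan_skip (bs : List (List Char)) (u v : List Char)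
    (h : ∀ j < u.length, ∀ b ∈ bs, ¬ b.take (u.length - j) <+: u.drop j) :
    pvScan bs (u ++ v) = u ++ pvScan bs v := by
  induction u with
  | nil => simp
  | cons c u' ih =>
    have hnone : bs.find? (fun b => b.isPrefixOf (c :: (u' ++ v))) = none := by
      rw [List.find?_eq_none]
      intro b hb hpre
      have hpre' : b <+: (c :: u') ++ v := by simpa using List.isPrefixOf_iff_prefix.mp hpre
      exact h 0 (by simp) b hb (by simpa using pvTake_prefix_of_prefix b (c :: u') v hpre')
    rw [List.cons_append, pvScan_cons_none hnone]
    rw [ih (fun j hj b hb => by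
      have := h (j + 1) (by simpa using Nat.succ_lt_succ hj) b hb
      simpa using this)]
    rfl

lemma pvNot_prefix_scan (bs : List (List Char)) :
    ∀ (s t : List Char), t ≠ [] → '<' ∉ t → ¬ t <+: s → ¬ t <+: pvScan bs s := by
  intro s
  induction s using pvScan.induct bs with
  | case1 =>
    intro t ht _ _
    rw [pvScan_nil_eq]
    intro hpre
    exact ht (List.prefix_nil.mp hpre)
  | case2 c cs b hf ih =>
    intro t ht hlt _
    rw [pvScan_cons_some hf]
    intro hpre
    cases t with
    | nil => exact ht rfl
    | cons x t' =>
      have hmk : "<mark>".toList = '<' :: "mark>".toList := by decide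
      rw [pvWrapL, hmk] at hpre
      simp only [List.cons_append, List.append_assoc] at hpre
      rw [List.cons_prefix_cons] at hpre
      exact hlt (by simp [hpre.1])
  | case3 c cs hf ih =>
    intro t ht hlt hnp
    rw [pvScan_cons_none hf]
    intro hpre
    cases t with
    | nil => exact ht rfl
    | cons x t' =>
      obtain ⟨hx, hpre'⟩ := List.cons_prefix_cons.mp hpre
      subst hx
      cases t' with
      | nil => exact hnp (by simp)
      | cons y t'' =>
        have hnp' : ¬ (y :: t'') <+: cs := by
          intro hc
          exact hnp (by rw [List.cons_prefix_cons]; exact ⟨rfl, hc⟩)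
        exact ih (y :: t'') (by simp) (fun hm => hlt (by simp [hm])) hnp' hpre'

lemma pvScan_nil : ∀ s, pvScan [] s = s := by
  intro s
  induction s with
  | nil => exact pvScan_nil_eq []
  | cons c cs ih =>
    rw [pvScan_cons_none (by rw [List.find?_eq_none]; intro x hx; simp at hx)]
    rw [ih]

lemma pvGen (bs : List (List Char)) (b tb : List Char) (hb : b = '@' :: tb) (htb : tb ≠ [])
    (hlt : '<' ∉ tb)
    (hskip : ∀ b' ∈ bs, ∀ j < (pvWrapL b').length,
      ¬ b.take ((pvWrapL b').length - j) <+: (pvWrapL b').drop j)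
    (htskip : ∀ j < tb.length, ∀ b' ∈ bs, ¬ b'.take (tb.length - j) <+: tb.drop j) :
    ∀ s, pvRepl b (pvWrapL b) (pvScan bs s) = pvScan (bs ++ [b]) s := by
  have hbne : b ≠ [] := by simp [hb]
  have main : ∀ n (s : List Char), s.length ≤ n →
      pvRepl b (pvWrapL b) (pvScan bs s) = pvScan (bs ++ [b]) s := by
    intro n
    induction n with
    | zero =>
      intro s hs
      have : s = [] := List.eq_nil_of_length_eq_zero (Nat.le_zero.mp hs)
      subst this
      rw [pvScan_nil_eq, pvRepl_nil_eq, pvScan_nil_eq]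
    | succ n ih =>
      intro s hs
      cases s with
      | nil => rw [pvScan_nil_eq, pvRepl_nil_eq, pvScan_nil_eq]
      | cons c cs =>
        have hcs : cs.length ≤ n := by simp only [List.length_cons] at hs; omega
        cases hf : bs.find? (fun b' => b'.isPrefixOf (c :: cs)) with
        | some b' =>
          have hmem : b' ∈ bs := List.mem_of_find?_eq_some hf
          have hfapp : (bs ++ [b]).find? (fun b' => b'.isPrefixOf (c :: cs)) = some b' := by
            rw [List.find?_append, hf]; rfl
          rw [pvScan_cons_some hf, pvScan_cons_some hfapp]
          rw [pvRepl_skip _ _ _ _ hbne (hskip b' hmem)]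
          have hle : (cs.drop (b'.length - 1)).length ≤ n := by
            simp only [List.length_drop]; omega
          rw [ih _ hle]
        | none =>
          have hfapp : (bs ++ [b]).find? (fun b' => b'.isPrefixOf (c :: cs)) =
              [b].find? (fun b' => b'.isPrefixOf (c :: cs)) := by
            rw [List.find?_append, hf]; rfl
          by_cases hp : b.isPrefixOf (c :: cs) = true
          · -- b matches at the head
            have hpre : b <+: c :: cs := List.isPrefixOf_iff_prefix.mp hp
            have hc : c = '@' := by
              rw [hb] at hpre
              exact ((List.cons_prefix_cons.mp hpre).1).symm
            have htbpre : tb <+: cs := by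
              rw [hb] at hpre
              exact (List.cons_prefix_cons.mp hpre).2
            obtain ⟨rest, hrest⟩ := htbpre
            have hfb : (bs ++ [b]).find? (fun b' => b'.isPrefixOf (c :: cs)) = some b := by
              rw [hfapp]; simp [hp]
            rw [pvScan_cons_none hf, pvScan_cons_some hfb]
            have hdrop : cs.drop (b.length - 1) = rest := by
              rw [hb, ← hrest]
              simp
            rw [hdrop]
            have hscs : pvScan bs cs = tb ++ pvScan bs rest := by
              rw [← hrest, pvScan_skip bs tb rest htskip]
            rw [hscs]
            have hpre2 : b.isPrefixOf (c :: (tb ++ pvScan bs rest)) = true := by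
              rw [List.isPrefixOf_iff_prefix, hb, hc]
              exact List.cons_prefix_cons.mpr ⟨rfl, List.prefix_append _ _⟩
            rw [pvRepl_cons_pos _ hpre2]
            have hdrop2 : (tb ++ pvScan bs rest).drop (b.length - 1) = pvScan bs rest := by
              rw [hb]; simp
            rw [hdrop2]
            have hrle : rest.length ≤ n := by
              have : cs.length = tb.length + rest.length := by rw [← hrest]; simp
              omega
            rw [ih _ hrle]
          · -- no brand matches at the head
            have hfb : (bs ++ [b]).find? (fun b' => b'.isPrefixOf (c :: cs)) = none := by
              rw [hfapp]; simp [hp]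
            rw [pvScan_cons_none hf, pvScan_cons_none hfb]
            have hnp2 : ¬ b.isPrefixOf (c :: pvScan bs cs) = true := by
              intro hpre
              have hpre' := List.isPrefixOf_iff_prefix.mp hpre
              rw [hb] at hpre'
              obtain ⟨hc, htpre⟩ := List.cons_prefix_cons.mp hpre'
              have hnpcs : ¬ tb <+: cs := by
                intro htc
                exact hp (by
                  rw [List.isPrefixOf_iff_prefix, hb, ← hc]
                  exact List.cons_prefix_cons.mpr ⟨rfl, htc⟩)
              exact pvNot_prefix_scan bs cs tb htb hlt hnpcs htpre
            rw [pvRepl_cons_neg _ hnp2, ih _ hcs]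
  intro s
  exact main s.length s (le_refl _)

-- A's guard `if brand in text` is redundant: replace is the identity when the brand is absent.
lemma pvStep_eq (t brand : String) (h : brand.toList ≠ []) :
    (if PySem.Str.isIn brand t then
        PySem.Str.replace t brand ("<mark>" ++ brand ++ "</mark>")
      else t) = PySem.Str.replace t brand ("<mark>" ++ brand ++ "</mark>") := by
  by_cases hin : PySem.Str.isIn brand t = true
  · rw [if_pos hin]
  · rw [if_neg hin]
    have hni : ¬ brand.toList <:+: t.toList := by
      rw [← PySem.Str.isIn_iff_infix]
      exact hin
    have : PySem.Str.replace t brand ("<mark>" ++ brand ++ "</mark>") = t := by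
      apply String.toList_inj.mp
      rw [PySem.Str.toList_replace, pvChars_replace_eq _ _ _ h,
        pvRepl_of_not_infix _ _ h _ hni]
    rw [this]

lemma pvWrap_toList (brand : String) :
    ("<mark>" ++ brand ++ "</mark>").toList = pvWrapL brand.toList := by
  simp [pvWrapL, String.toList_append]

lemma pvReplace_toList (t brand : String) (h : brand.toList ≠ []) :
    (PySem.Str.replace t brand ("<mark>" ++ brand ++ "</mark>")).toList =
      pvRepl brand.toList (pvWrapL brand.toList) t.toList := by
  rw [PySem.Str.toList_replace, pvChars_replace_eq _ _ _ h, pvWrap_toList]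

-- ===== VERDICT (by name: the statement is the Claim_ definition above) =====
theorem filter_brands_spec : Claim_equal_filter_brands := by
  intro text _
  unfold Spec_filter_brands
  apply String.toList_inj.mp
  simp only [filter_brands, pvBrands, List.foldl]
  rw [pvStep_eq _ _ (by decide), pvStep_eq _ _ (by decide), pvStep_eq _ _ (by decide),
    pvStep_eq _ _ (by decide), pvStep_eq _ _ (by decide), pvStep_eq _ _ (by decide)]
  rw [pvReplace_toList _ _ (by decide), pvReplace_toList _ _ (by decide),
    pvReplace_toList _ _ (by decide), pvReplace_toList _ _ (by decide),
    pvReplace_toList _ _ (by decide), pvReplace_toList _ _ (by decide)]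
  simp only [filter_brands_alt, String.toList_ofList, pvBrandsL]
  have g1 : ∀ s, pvRepl "@WarbyParker".toList (pvWrapL "@WarbyParker".toList) (pvScan [] s) = pvScan ["@WarbyParker".toList] s :=
    pvGen [] "@WarbyParker".toList "WarbyParker".toList (by decide) (by decide) (by decide) (by decide) (by decide)
  have g2 : ∀ s, pvRepl "@Bonobos".toList (pvWrapL "@Bonobos".toList) (pvScan ["@WarbyParker".toList] s) = pvScan ["@WarbyParker".toList, "@Bonobos".toList] s :=
    pvGen ["@WarbyParker".toList] "@Bonobos".toList "Bonobos".toList (by decide) (by decide) (by decide) (by decide) (by decide)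
  have g3 : ∀ s, pvRepl "@Casper".toList (pvWrapL "@Casper".toList) (pvScan ["@WarbyParker".toList, "@Bonobos".toList] s) = pvScan ["@WarbyParker".toList, "@Bonobos".toList, "@Casper".toList] s :=
    pvGen ["@WarbyParker".toList, "@Bonobos".toList] "@Casper".toList "Casper".toList (by decide) (by decide) (by decide) (by decide) (by decide)
  have g4 : ∀ s, pvRepl "@Glossier".toList (pvWrapL "@Glossier".toList) (pvScan ["@WarbyParker".toList, "@Bonobos".toList, "@Casper".toList] s) = pvScan ["@WarbyParker".toList, "@Bonobos".toList, "@Casper".toList, "@Glossier".toList] s :=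
    pvGen ["@WarbyParker".toList, "@Bonobos".toList, "@Casper".toList] "@Glossier".toList "Glossier".toList (by decide) (by decide) (by decide) (by decide) (by decide)
  have g5 : ∀ s, pvRepl "@DollarShaveClub".toList (pvWrapL "@DollarShaveClub".toList) (pvScan ["@WarbyParker".toList, "@Bonobos".toList, "@Casper".toList, "@Glossier".toList] s) = pvScan ["@WarbyParker".toList, "@Bonobos".toList, "@Casper".toList, "@Glossier".toList, "@DollarShaveClub".toList] s :=
    pvGen ["@WarbyParker".toList, "@Bonobos".toList, "@Casper".toList, "@Glossier".toList] "@DollarShaveClub".toList "DollarShaveClub".toList (by decide) (by decide) (by decide) (by decide) (by decide)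
  have g6 : ∀ s, pvRepl "@Allbirds".toList (pvWrapL "@Allbirds".toList) (pvScan ["@WarbyParker".toList, "@Bonobos".toList, "@Casper".toList, "@Glossier".toList, "@DollarShaveClub".toList] s) = pvScan ["@WarbyParker".toList, "@Bonobos".toList, "@Casper".toList, "@Glossier".toList, "@DollarShaveClub".toList, "@Allbirds".toList] s :=
    pvGen ["@WarbyParker".toList, "@Bonobos".toList, "@Casper".toList, "@Glossier".toList, "@DollarShaveClub".toList] "@Allbirds".toList "Allbirds".toList (by decide) (by decide) (by decide) (by decide) (by decide)
  conv_lhs => rw [← pvScan_nil text.toList]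
  rw [g1, g2, g3, g4, g5, g6]
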